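-- pv_equiv track=rewrite | github.com/gmn/4chget | 4chget.py | get_quoted_strings
-- ===== SOURCE A (Python) =====
-- def str_indexes( needle, haystack ):
--     """ returns list of all indexes of needle found in haystack """
--     nlen = len(needle)
--     res = []
--     index = 0
--
--     while True:
--         try:
--             i = haystack.index( needle, index )
--         except:
--             break
--         res.append(i)
--         index = i + nlen
--     return res
--
-- def get_quoted_strings( sentinel, haystack, payload ):
--     count = 0
--     indexes = str_indexes( sentinel, haystack )
--     for index, start in enumerate(indexes):
--         start += len(sentinel)
--         end = haystack.index('"', start)
--         assert(haystack[end] == '"')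
--         tstring = haystack[start:end].rstrip().lstrip()
--         payload.append(tstring)
--         count = count + 1
--     return count
-- ===== SOURCE B (Python) =====
-- def get_quoted_strings(sentinel, haystack, payload):
--     # one streaming scan: cursor continues after the closing quote; no precomputed table
--     count = 0
--     pos = 0
--     while True:
--         try:
--             i = haystack.index(sentinel, pos)
--         except ValueError:
--             return count
--         start = i + len(sentinel)
--         end = haystack.index('"', start)
--         payload.append(haystack[start:end].strip())
--         count += 1
--         pos = end + 1
-- ===== Notes on version B (the rewrite author's own statement) =====
-- stated objective: alternative
-- what changed: A builds the complete table of sentinel positions with the helper str_indexes and then iterates it in a second loop; B is a single streaming while-loop that interleaves the sentinel search, the quote search and the append, and continues the scan after the closing quote, so a sentinel occurrence inside an already-extracted quoted string (a corner Pre_ excludes) does not start a new match.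
-- outside the precondition, e.g. on get_quoted_strings('X', 'XaXb"', []): A returns 2, B returns 1; on get_quoted_strings('"', '" "ba', []): A raises ValueError, B returns 1
import Mathlib
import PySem

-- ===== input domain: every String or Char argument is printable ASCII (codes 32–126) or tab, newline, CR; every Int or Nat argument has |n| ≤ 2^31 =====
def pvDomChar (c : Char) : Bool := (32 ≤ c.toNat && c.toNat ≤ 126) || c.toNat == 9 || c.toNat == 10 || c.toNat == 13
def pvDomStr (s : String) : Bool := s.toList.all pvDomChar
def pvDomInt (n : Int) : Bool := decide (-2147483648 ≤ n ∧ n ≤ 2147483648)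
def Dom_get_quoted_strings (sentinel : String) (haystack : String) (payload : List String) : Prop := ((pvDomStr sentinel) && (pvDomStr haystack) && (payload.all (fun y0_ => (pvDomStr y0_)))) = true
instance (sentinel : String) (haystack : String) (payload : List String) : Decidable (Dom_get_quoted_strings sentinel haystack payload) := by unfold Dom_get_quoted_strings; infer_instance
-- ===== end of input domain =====

-- B replaces A's "build the full table of sentinel positions with str_indexes, then iterate
-- it" by one streaming while-loop that continues after each closing quote (alternative
-- decomposition, same cost); both mutate `payload` in place identically in Python on the
-- admitted inputs — the equivalence proved here is about the RETURN value only.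

-- ===== PORT A =====
-- str_indexes' while-True loop; fuel = |haystack|+1 bounds the iterations (the index strictly
-- increases while sentinel ≠ ""; Pre_ excludes sentinel = "").
def pvStrIndexesAux (needle hay : List Char) (fuel : Nat) (index : Int) (res : List Int) : List Int :=
  match fuel with
  | 0 => res
  | f + 1 =>
    let i := PySem.Chars.findFrom hay needle index none   -- haystack.index(needle, index); -1 = except → break
    if i = -1 then res
    else pvStrIndexesAux needle hay f (i + needle.length) (res ++ [i])

-- the for-loop body of A; `none` = the ValueError of haystack.index('"', start)
def pvProcA (sl hl : List Char) (indexes : List Int) (count : Int) (payload : List (List Char)) : Option Int :=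
  match indexes with
  | [] => some count
  | start0 :: rest =>
    let start := start0 + sl.length                        -- start += len(sentinel)
    let e := PySem.Chars.findFrom hl ['"'] start none      -- end = haystack.index('"', start)
    if e = -1 then none
    else
      -- assert(haystack[end] == '"') holds whenever the index is found
      let tstring := PySem.Chars.lstrip (PySem.Chars.rstrip (PySem.Chars.slice hl (some start) (some e)))
      pvProcA sl hl rest (count + 1) (payload ++ [tstring])

def get_quoted_strings (sentinel : String) (haystack : String) (payload : List String) : Int :=
  let sl := sentinel.toList
  let hl := haystack.toList
  let indexes := pvStrIndexesAux sl hl (hl.length + 1) 0 []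
  match pvProcA sl hl indexes 0 (payload.map String.toList) with
  | some count => count
  | none => 0                                              -- ValueError path, excluded by Pre_

-- ===== PORT B =====
-- one interleaved scan: cursor pos (continuing after the closing quote), count and payload
-- carried together; `none` = the ValueError of haystack.index('"', start)
def pvLoopB (sl hl : List Char) (fuel : Nat) (pos : Int) (count : Int) (payload : List (List Char)) : Option Int :=
  match fuel with
  | 0 => some count
  | f + 1 =>
    let i := PySem.Chars.findFrom hl sl pos none           -- haystack.index(sentinel, pos); -1 = except → return count
    if i = -1 then some count
    else
      let start := i + sl.length
      let e := PySem.Chars.findFrom hl ['"'] start none    -- end = haystack.index('"', start)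
      if e = -1 then none
      else
        let t := PySem.Chars.strip (PySem.Chars.slice hl (some start) (some e))
        pvLoopB sl hl f (e + 1) (count + 1) (payload ++ [t])

def get_quoted_strings_alt (sentinel : String) (haystack : String) (payload : List String) : Int :=
  let sl := sentinel.toList
  let hl := haystack.toList
  match pvLoopB sl hl (hl.length + 1) 0 0 (payload.map String.toList) with
  | some count => count
  | none => 0                                              -- ValueError path, excluded by Pre_

-- ===== PRECONDITION & SPEC =====
-- Pre_ excludes (a) sentinel = "" (str_indexes' index('')-loop never advances, so A never
-- returns), (b) inputs where some sentinel occurrence has no '"' after it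
-- (haystack.index('"', start) raises ValueError), and (c) haystacks where the sentinel
-- re-occurs INSIDE an extracted quoted string (between an occurrence's end and the next '"'):
-- whether such an embedded occurrence starts a new match of its own is a corner no caller
-- would specify — A re-matches there and extracts overlapping duplicated text, while B
-- continues scanning after the closing quote (see the cites).
def Pre_get_quoted_strings (sentinel : String) (haystack : String) (payload : List String) : Prop :=
  sentinel.toList ≠ [] ∧
  ∀ i ∈ List.range haystack.toList.length,
    sentinel.toList <+: haystack.toList.drop i →
      (∃ q ∈ List.range haystack.toList.length,
        i + sentinel.toList.length ≤ q ∧ ['"'] <+: haystack.toList.drop q) ∧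
      ∀ i' ∈ List.range haystack.toList.length,
        sentinel.toList <+: haystack.toList.drop i' →
        i + sentinel.toList.length ≤ i' →
        ∃ q ∈ List.range haystack.toList.length,
          i + sentinel.toList.length ≤ q ∧ q < i' ∧ ['"'] <+: haystack.toList.drop q
instance (sentinel : String) (haystack : String) (payload : List String) : Decidable (Pre_get_quoted_strings sentinel haystack payload) := by unfold Pre_get_quoted_strings; infer_instance

def pvWitness_get_quoted_strings : String × String × List String := ("X", "X hi\" tail", [])

def Spec_get_quoted_strings (sentinel : String) (haystack : String) (payload : List String) (out : Int) : Prop := out = get_quoted_strings_alt sentinel haystack payload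
instance (sentinel : String) (haystack : String) (payload : List String) (out : Int) : Decidable (Spec_get_quoted_strings sentinel haystack payload out) := by unfold Spec_get_quoted_strings; infer_instance

-- ===== CLAIM (what is proved, stated in full; the proofs are below) =====
def Claim_equal_get_quoted_strings : Prop := ∀ (sentinel : String) (haystack : String) (payload : List String), Dom_get_quoted_strings sentinel haystack payload → Pre_get_quoted_strings sentinel haystack payload → Spec_get_quoted_strings sentinel haystack payload (get_quoted_strings sentinel haystack payload)

-- ===== LEMMAS AND PROOFS =====

-- .strip() agrees with .rstrip().lstrip(); proved on List.dropWhile (trimming the two ends commutes)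
theorem pv_rstrip_cons (p : Char → Bool) (c : Char) (cs : List Char) :
    (List.dropWhile p (c :: cs).reverse).reverse
      = if p c ∧ (List.dropWhile p cs.reverse).reverse = [] then []
        else c :: (List.dropWhile p cs.reverse).reverse := by
  simp only [List.reverse_cons, List.dropWhile_append]
  by_cases h : List.dropWhile p cs.reverse = []
  · simp only [h, List.isEmpty_nil, if_true, List.reverse_nil, List.dropWhile]
    by_cases hc : p c <;> simp [hc]
  · simp [h]

theorem pv_lstrip_rstrip_comm (p : Char → Bool) (cs : List Char) :
    List.dropWhile p (List.dropWhile p cs.reverse).reverse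
      = (List.dropWhile p (List.dropWhile p cs).reverse).reverse := by
  induction cs with
  | nil => simp
  | cons c cs ih =>
    rw [pv_rstrip_cons]
    by_cases hc : p c
    · by_cases hr : (List.dropWhile p cs.reverse).reverse = []
      · simp [hc, hr, ← ih]
      · simp only [hc, hr, and_false, if_false]
        simp [hc, ih]
    · simp only [hc, false_and, if_false, Bool.false_eq_true]
      rw [List.dropWhile_cons_of_neg hc, List.dropWhile_cons_of_neg hc, pv_rstrip_cons]
      simp [hc]

theorem pv_strip_eq (cs : List Char) :
    PySem.Chars.lstrip (PySem.Chars.rstrip cs) = PySem.Chars.strip cs := by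
  simp [PySem.Chars.strip, PySem.Chars.lstrip, PySem.Chars.rstrip, pv_lstrip_rstrip_comm]

-- an occurrence of a nonempty needle fits inside the haystack
theorem pv_occ_bound (sl hl : List Char) (hsl : sl ≠ []) (j : Nat)
    (h : sl <+: hl.drop j) : j + sl.length ≤ hl.length := by
  have h1 := h.length_le
  rw [List.length_drop] at h1
  by_cases hj : j ≤ hl.length
  · omega
  · exfalso
    rw [List.drop_eq_nil_of_le (by omega)] at h
    exact hsl (List.prefix_nil.mp h)

-- an occurrence at position k + i is an infix of the tail dropped at k
theorem pv_infix_of_occ (sl hl : List Char) (k j : Nat) (hkj : k ≤ j)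
    (h : sl <+: hl.drop j) : sl <:+: hl.drop k := by
  have : hl.drop j = (hl.drop k).drop (j - k) := by
    rw [List.drop_drop]
    congr 1
    omega
  rw [this] at h
  exact h.isInfix.trans (List.drop_suffix _ _).isInfix

-- str_indexes' accumulator only ever grows at the tail
theorem pvStrIndexesAux_acc (needle hay : List Char) (fuel : Nat) (index : Int) (res : List Int) :
    pvStrIndexesAux needle hay fuel index res = res ++ pvStrIndexesAux needle hay fuel index [] := by
  induction fuel generalizing index res with
  | zero => simp [pvStrIndexesAux]
  | succ f ih =>
    simp only [pvStrIndexesAux]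
    split_ifs with h
    · simp
    · rw [ih _ (res ++ _), ih _ ([] ++ _)]
      simp

-- KEY: after a match at j whose quote sits at e (the first '"' at or after j + len sentinel),
-- with no sentinel occurrence inside the quoted span (Pre_'s clause (c)), the next match
-- found from e + 1 (B's cursor) is the next match found from j + len sentinel (A's scan)
theorem pv_realign (sl hl : List Char) (hsl : sl ≠ [])
    (H : ∀ j j' : Nat, sl <+: hl.drop j → sl <+: hl.drop j' → j + sl.length ≤ j' →
         ∃ q : Nat, j + sl.length ≤ q ∧ q < j' ∧ ['"'] <+: hl.drop q)
    (j e : Nat) (hocc : sl <+: hl.drop j)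
    (hej : j + sl.length ≤ e)
    (hemin : ∀ q : Nat, j + sl.length ≤ q → q < e → ¬ ['"'] <+: hl.drop q)
    (hbe : e + 1 ≤ hl.length) :
    PySem.Chars.findFrom hl sl ((e + 1 : Nat) : Int) none
      = PySem.Chars.findFrom hl sl ((j + sl.length : Nat) : Int) none := by
  have hm : 1 ≤ sl.length := List.length_pos_iff.mpr hsl
  have hb := pv_occ_bound sl hl hsl j hocc
  -- every occurrence at position ≥ j + len lies beyond the quote: ≥ e + 1
  have key : ∀ i' : Nat, sl <+: hl.drop i' → j + sl.length ≤ i' → e + 1 ≤ i' := by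
    intro i' hoc' hge
    obtain ⟨q, hq1, hq2, hq3⟩ := H j i' hocc hoc' hge
    by_cases hqe : q < e
    · exact absurd hq3 (hemin q hq1 hqe)
    · omega
  by_cases hA : PySem.Chars.findFrom hl sl ((e + 1 : Nat) : Int) none = -1
  · rw [hA]
    rw [PySem.Chars.findFrom_natCast_eq_neg_one_iff hl sl (e + 1) hbe] at hA
    symm
    rw [PySem.Chars.findFrom_natCast_eq_neg_one_iff hl sl (j + sl.length) hb]
    intro hinf
    obtain ⟨x, hx⟩ := (PySem.Chars.exists_prefix_drop_iff_isIn sl (hl.drop (j + sl.length))).mpr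
      ((PySem.Chars.isIn_iff_infix sl (hl.drop (j + sl.length))).mpr hinf)
    rw [List.drop_drop] at hx
    have hxe := key (j + sl.length + x) hx (by omega)
    exact hA (pv_infix_of_occ sl hl (e + 1) (j + sl.length + x) hxe hx)
  · obtain ⟨hle, hpre, hmin⟩ := PySem.Chars.findFrom_natCast_spec hl sl (e + 1) hbe hA
    set va := PySem.Chars.findFrom hl sl ((e + 1 : Nat) : Int) none with hva
    have hva0 : 0 ≤ va := le_trans (by positivity) hle
    have hvaj : j + sl.length ≤ va.toNat := by
      have h' : ((e + 1 : Nat) : Int) ≤ va := hle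
      omega
    -- the search from j + len also succeeds
    have hB : PySem.Chars.findFrom hl sl ((j + sl.length : Nat) : Int) none ≠ -1 := by
      intro hBeq
      rw [PySem.Chars.findFrom_natCast_eq_neg_one_iff hl sl (j + sl.length) hb] at hBeq
      exact hBeq (pv_infix_of_occ sl hl (j + sl.length) va.toNat hvaj hpre)
    obtain ⟨hle', hpre', hmin'⟩ := PySem.Chars.findFrom_natCast_spec hl sl (j + sl.length) hb hB
    set vb := PySem.Chars.findFrom hl sl ((j + sl.length : Nat) : Int) none with hvb
    have hvb0 : 0 ≤ vb := le_trans (by positivity) hle'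
    have hvbe : e + 1 ≤ vb.toNat := by
      apply key vb.toNat hpre'
      have h' : ((j + sl.length : Nat) : Int) ≤ vb := hle'
      omega
    have hab : va.toNat ≤ vb.toNat := by
      by_contra hlt
      exact hmin vb.toNat hvbe (by omega) hpre'
    have hba : vb.toNat ≤ va.toNat := by
      by_contra hlt
      exact hmin' va.toNat hvaj (by omega) hpre
    omega

-- MAIN: as long as the two cursors see the same next match, B's interleaved scan computes
-- exactly A's "table first, then process" with the same fuel
theorem pvLoopB_eq_procA (sl hl : List Char) (hsl : sl ≠ [])
    (H : ∀ j j' : Nat, sl <+: hl.drop j → sl <+: hl.drop j' → j + sl.length ≤ j' →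
         ∃ q : Nat, j + sl.length ≤ q ∧ q < j' ∧ ['"'] <+: hl.drop q)
    (fuel : Nat) :
    ∀ (pa pb : Nat), pa ≤ hl.length → pb ≤ hl.length →
      PySem.Chars.findFrom hl sl (pa : Int) none = PySem.Chars.findFrom hl sl (pb : Int) none →
      ∀ (c : Int) (p : List (List Char)),
        pvLoopB sl hl fuel (pb : Int) c p
          = pvProcA sl hl (pvStrIndexesAux sl hl fuel (pa : Int) []) c p := by
  induction fuel with
  | zero => intro pa pb _ _ _ c p; simp [pvLoopB, pvStrIndexesAux, pvProcA]
  | succ f ih =>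
    intro pa pb hpa hpb heq c p
    simp only [pvLoopB, pvStrIndexesAux, ← heq]
    by_cases h : PySem.Chars.findFrom hl sl (pa : Int) none = -1
    · simp [h, pvProcA]
    · rw [if_neg h, if_neg h]
      -- the found match
      obtain ⟨hle, hpre, _⟩ := PySem.Chars.findFrom_natCast_spec hl sl pa hpa h
      set i := PySem.Chars.findFrom hl sl (pa : Int) none with hi
      have hi0 : 0 ≤ i := le_trans (by positivity) hle
      have hoccI : sl <+: hl.drop i.toNat := hpre
      have hbnd := pv_occ_bound sl hl hsl i.toNat hoccI
      have hm : 1 ≤ sl.length := List.length_pos_iff.mpr hsl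
      have c2 : i + (sl.length : Int) = ((i.toNat + sl.length : Nat) : Int) := by push_cast; omega
      rw [pvStrIndexesAux_acc, List.nil_append, List.singleton_append]
      simp only [pvProcA]
      by_cases h2 : PySem.Chars.findFrom hl ['"'] (i + (sl.length : Int)) none = -1
      · -- both hit the ValueError of the quote search
        rw [if_pos h2, if_pos h2]
      · rw [if_neg h2, if_neg h2]
        -- the found quote e, the first '"' at or after i + len sentinel
        rw [c2] at h2 ⊢
        obtain ⟨hleE, hpreE, hminE⟩ :=
          PySem.Chars.findFrom_natCast_spec hl ['"'] (i.toNat + sl.length) hbnd h2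
        set e := PySem.Chars.findFrom hl ['"'] ((i.toNat + sl.length : Nat) : Int) none with he
        have he0 : 0 ≤ e := le_trans (by positivity) hleE
        have hej : i.toNat + sl.length ≤ e.toNat := by
          have h' : ((i.toNat + sl.length : Nat) : Int) ≤ e := hleE
          omega
        have hqb : e.toNat + 1 ≤ hl.length := by
          have := pv_occ_bound ['"'] hl (by simp) e.toNat hpreE
          simpa using this
        have c1 : e + 1 = ((e.toNat + 1 : Nat) : Int) := by push_cast; omega
        have hemin : ∀ q : Nat, i.toNat + sl.length ≤ q → q < e.toNat → ¬ ['"'] <+: hl.drop q :=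
          fun q hq1 hq2 => hminE q hq1 hq2
        rw [c1]
        rw [ih (i.toNat + sl.length) (e.toNat + 1) hbnd (by omega)
            (pv_realign sl hl hsl H i.toNat e.toNat hoccI hej hemin (by omega)).symm]
        rw [pv_strip_eq]

-- ===== VERDICT (by name: the statement is the Claim_ definition above) =====
theorem get_quoted_strings_spec : Claim_equal_get_quoted_strings := by
  intro sentinel haystack payload _ hpre
  obtain ⟨hsl, hbody⟩ := hpre
  unfold Spec_get_quoted_strings
  have hm : 1 ≤ sentinel.toList.length := List.length_pos_iff.mpr hsl
  have H : ∀ j j' : Nat, sentinel.toList <+: haystack.toList.drop j →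
      sentinel.toList <+: haystack.toList.drop j' → j + sentinel.toList.length ≤ j' →
      ∃ q : Nat, j + sentinel.toList.length ≤ q ∧ q < j' ∧
        ['"'] <+: haystack.toList.drop q := by
    intro j j' hj hj' hle
    have hbj := pv_occ_bound _ _ hsl j hj
    have hbj' := pv_occ_bound _ _ hsl j' hj'
    obtain ⟨q, _, hq1, hq2, hq3⟩ :=
      (hbody j (List.mem_range.mpr (by omega)) hj).2 j' (List.mem_range.mpr (by omega)) hj' hle
    exact ⟨q, hq1, hq2, hq3⟩
  have key := pvLoopB_eq_procA sentinel.toList haystack.toList hsl H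
    (haystack.toList.length + 1) 0 0 (by omega) (by omega) rfl 0
    (payload.map String.toList)
  simp only [Nat.cast_zero] at key
  simp only [get_quoted_strings, get_quoted_strings_alt, key]
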